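-- pv_equiv track=rewrite | github.com/HumbertoBPF/LeetCodePython | SolutionLeetCode282.py | merge_digits
-- ===== SOURCE A (Python) =====
-- def merge_digits(digits, operators):
--     n = len(digits)
--     nums = [digits[0]]
--     math_operators = []
--
--     for i in range(1, n):
--         operator = operators[i - 1]
--         num = digits[i]
--
--         if operator == "":
--             # We should not allow leading zeroes
--             if nums[-1] == 0:
--                 return None, None
--             nums[-1] = int(str(nums[-1]) + str(num))
--             continue
--
--         nums.append(num)
--         math_operators.append(operator)
--
--     return nums, math_operators
-- ===== SOURCE B (Python) =====
-- def merge_digits(digits, operators):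
--     # Phase 1: cut the digits into consecutive groups at every non-empty operator.
--     groups = [[digits[0]]]
--     math_operators = []
--     for num, operator in zip(digits[1:], operators):
--         if operator == "":
--             groups[-1].append(num)
--         else:
--             math_operators.append(operator)
--             groups.append([num])
--     # Phase 2: merge each group left to right (no leading zeroes allowed).
--     nums = []
--     for group in groups:
--         merged = group[0]
--         for num in group[1:]:
--             if merged == 0:
--                 return None, None
--             merged = int(str(merged) + str(num))
--         nums.append(merged)
--     return nums, math_operators
-- ===== Notes on version B (the rewrite author's own statement) =====
-- stated objective: alternative
-- what changed: B replaces A's single indexed loop that mutates nums[-1] in place by a two-phase pass: first cut the digits into operator-delimited groups with zip(digits[1:], operators), then merge each group left to right in a second loop.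
-- outside the precondition, e.g. on merge_digits([0, 1, -2], ['', '']): A returns (None, None), B returns (None, None); on merge_digits([0, 1, 5], ['']): A returns (None, None), B returns (None, None)
import Mathlib
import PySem

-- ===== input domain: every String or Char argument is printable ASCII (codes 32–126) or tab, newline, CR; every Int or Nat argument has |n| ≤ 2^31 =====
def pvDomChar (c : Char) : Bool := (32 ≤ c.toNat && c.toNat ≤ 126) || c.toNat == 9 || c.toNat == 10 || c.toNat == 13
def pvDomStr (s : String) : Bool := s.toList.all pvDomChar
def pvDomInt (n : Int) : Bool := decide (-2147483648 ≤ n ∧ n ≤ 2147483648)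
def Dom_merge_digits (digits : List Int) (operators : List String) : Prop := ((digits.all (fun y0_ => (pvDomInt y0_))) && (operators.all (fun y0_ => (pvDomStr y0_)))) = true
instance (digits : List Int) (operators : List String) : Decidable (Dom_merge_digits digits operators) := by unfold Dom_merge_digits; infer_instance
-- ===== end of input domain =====

-- B re-implements A in two phases (cut the digits into operator-delimited groups, then merge
-- each group) instead of A's single indexed loop mutating nums[-1]; same values, no speed claim.

-- ===== PORT A =====
-- A's for-loop over i in range(1, n); nums/math_operators are kept reversed (head = Python's
-- nums[-1]); `int(str(a) + str(b))` is PySem.Int.ofChars? on the concatenated PySem.Int.toChars.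
-- Paths where Python raises (IndexError on digits[0]/operators[i-1], ValueError from int())
-- return (none, none); they are excluded by Pre_merge_digits.
def mergeLoopA (digits : List Int) (operators : List String) :
    List Int → List Int → List String → Option (List Int) × Option (List String)
  | [], rnums, rops => (some rnums.reverse, some rops.reverse)
  | i :: rest, rnums, rops =>
    match PySem.List.pyGet? operators (i - 1), PySem.List.pyGet? digits i with
    | some operator, some num =>
      if operator = "" then
        match rnums with
        | [] => (none, none)            -- unreachable: nums is never empty
        | last :: prev =>
          if last = 0 then (none, none)
          else
            match PySem.Int.ofChars? (PySem.Int.toChars last ++ PySem.Int.toChars num) with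
            | some v => mergeLoopA digits operators rest (v :: prev) rops
            | none => (none, none)      -- ValueError: outside Pre_
      else mergeLoopA digits operators rest (num :: rnums) (operator :: rops)
    | _, _ => (none, none)              -- IndexError: outside Pre_

def merge_digits (digits : List Int) (operators : List String) :
    Option (List Int) × Option (List String) :=
  match PySem.List.pyGet? digits 0 with
  | none => (none, none)                -- IndexError on digits[0]: outside Pre_
  | some d0 => mergeLoopA digits operators (PySem.List.pyRange 1 (PySem.List.len digits)) [d0] []

-- ===== PORT B =====
-- Phase 1 of Source B: zip(digits[1:], operators), growing the current group (kept reversed) and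
-- collecting the finished groups (reversed) and the non-empty operators (reversed).
def cutGroups : List (Int × String) → List Int → List (List Int) → List String →
    (List (List Int) × List String)
  | [], cur, gsRev, opsRev => ((cur.reverse :: gsRev).reverse, opsRev.reverse)
  | (num, operator) :: rest, cur, gsRev, opsRev =>
    if operator = "" then cutGroups rest (num :: cur) gsRev opsRev
    else cutGroups rest [num] (cur.reverse :: gsRev) (operator :: opsRev)

-- Phase 2 inner loop of Source B: merge one group left to right from its head value.
-- none covers both Python outcomes that stop phase 2: `return None, None` (merged == 0)
-- and ValueError from int() (outside Pre_).
def mergeGroup : Int → List Int → Option Int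
  | v, [] => some v
  | v, num :: rest =>
    if v = 0 then none
    else
      match PySem.Int.ofChars? (PySem.Int.toChars v ++ PySem.Int.toChars num) with
      | some w => mergeGroup w rest
      | none => none

-- Phase 2 outer loop of Source B over the groups (nums accumulator kept reversed).
def mergeAll : List (List Int) → List Int → Option (List Int)
  | [], acc => some acc.reverse
  | g :: rest, acc =>
    match g with
    | [] => none                        -- unreachable: every group is non-empty
    | h :: t =>
      match mergeGroup h t with
      | some v => mergeAll rest (v :: acc)
      | none => none

def merge_digits_alt (digits : List Int) (operators : List String) :
    Option (List Int) × Option (List String) :=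
  match digits with
  | [] => (none, none)                  -- IndexError on digits[0]: outside Pre_
  | d0 :: tl =>
    match cutGroups (tl.zip operators) [d0] [] [] with
    | (gs, mops) =>
      match mergeAll gs [] with
      | some nums => (some nums, some mops)
      | none => (none, none)

-- ===== PRECONDITION & SPEC =====
-- Pre_ excludes (a) empty digits and operators shorter than len(digits)-1, where A raises
-- IndexError, and (b) inputs where a digit following an empty operator is negative, where
-- Python's int(str(a)+str(b)) raises ValueError in both A and B — (b) is slightly wider than
-- the exact raise set: when an earlier leading-zero group is hit first, both A and B return
-- (None, None) before reaching the negative digit.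
def Pre_merge_digits (digits : List Int) (operators : List String) : Prop :=
  digits ≠ [] ∧ digits.length ≤ operators.length + 1 ∧
    ∀ p ∈ digits.tail.zip operators, p.2 = "" → 0 ≤ p.1
instance (digits : List Int) (operators : List String) : Decidable (Pre_merge_digits digits operators) := by
  unfold Pre_merge_digits; infer_instance

def pvWitness_merge_digits : List Int × List String := ([1, 2, 3], ["", "+"])

def Spec_merge_digits (digits : List Int) (operators : List String)
    (out : Option (List Int) × Option (List String)) : Prop :=
  out = merge_digits_alt digits operators
instance (digits : List Int) (operators : List String) (out : Option (List Int) × Option (List String)) : Decidable (Spec_merge_digits digits operators out) := by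
  unfold Spec_merge_digits; infer_instance

-- ===== CLAIM (what is proved, stated in full; the proofs are below) =====
def Claim_equal_merge_digits : Prop := ∀ (digits : List Int) (operators : List String), Dom_merge_digits digits operators → Pre_merge_digits digits operators → Spec_merge_digits digits operators (merge_digits digits operators)

-- ===== LEMMAS AND PROOFS =====

-- Proof-only middle form of A's loop: the same interleaved state machine, driven by the
-- list of (digit, operator) pairs instead of indices.
def pairLoop : List (Int × String) → List Int → List String →
    Option (List Int) × Option (List String)
  | [], rnums, rops => (some rnums.reverse, some rops.reverse)
  | (num, operator) :: rest, rnums, rops =>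
    if operator = "" then
      match rnums with
      | [] => (none, none)
      | last :: prev =>
        if last = 0 then (none, none)
        else
          match PySem.Int.ofChars? (PySem.Int.toChars last ++ PySem.Int.toChars num) with
          | some v => pairLoop rest (v :: prev) rops
          | none => (none, none)
    else pairLoop rest (num :: rnums) (operator :: rops)

-- Proof-only value-passing form of B: processes the pairs carrying the merged value of the
-- current group instead of first materialising the groups.
def contB : List (Int × String) → Int → Option (List Int × List String)
  | [], v => some ([v], [])
  | (num, operator) :: rest, v =>
    if operator = "" then
      if v = 0 then none
      else
        match PySem.Int.ofChars? (PySem.Int.toChars v ++ PySem.Int.toChars num) with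
        | some w => contB rest w
        | none => none
    else
      match contB rest num with
      | some (ns, os) => some (v :: ns, operator :: os)
      | none => none

def mergeWhole (g : List Int) : Option Int :=
  match g with
  | [] => none
  | h :: t => mergeGroup h t

-- Pure recursion computing cutGroups' accumulators' tail.
def grp : List (Int × String) → List Int → (List (List Int) × List String)
  | [], cur => ([cur.reverse], [])
  | (num, operator) :: rest, cur =>
    if operator = "" then grp rest (num :: cur)
    else ((cur.reverse :: (grp rest [num]).1), operator :: (grp rest [num]).2)

def FB (pairs : List (Int × String)) (cur : List Int) : Option (List Int × List String) :=
  match ((grp pairs cur).1).mapM mergeWhole with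
  | some ns => some (ns, (grp pairs cur).2)
  | none => none

lemma cutGroups_eq_grp (pairs : List (Int × String)) :
    ∀ cur gsRev opsRev, cutGroups pairs cur gsRev opsRev
      = (gsRev.reverse ++ (grp pairs cur).1, opsRev.reverse ++ (grp pairs cur).2) := by
  induction pairs with
  | nil => intro cur gsRev opsRev; simp [cutGroups, grp]
  | cons p rest ih =>
    intro cur gsRev opsRev
    obtain ⟨num, operator⟩ := p
    by_cases h : operator = ""
    · simp [cutGroups, grp, h, ih]
    · simp [cutGroups, grp, h, ih]

lemma mergeAll_eq_mapM (gs : List (List Int)) :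
    ∀ acc, mergeAll gs acc = (gs.mapM mergeWhole).map (fun vs => acc.reverse ++ vs) := by
  induction gs with
  | nil => intro acc; simp [mergeAll]
  | cons g rest ih =>
    intro acc
    cases g with
    | nil => simp [mergeAll, mergeWhole, List.mapM_cons]
    | cons h t =>
      cases hm : mergeGroup h t with
      | none => simp [mergeAll, hm, mergeWhole, List.mapM_cons]
      | some v =>
        simp [mergeAll, hm, mergeWhole, List.mapM_cons, ih]
        cases rest.mapM mergeWhole <;> simp

-- mergeGroup can be resumed: merging t₁ ++ t₂ is merging t₁ and continuing with t₂.
lemma mergeGroup_append (t₁ : List Int) :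
    ∀ (v : Int) (t₂ : List Int), mergeGroup v (t₁ ++ t₂)
      = match mergeGroup v t₁ with
        | some w => mergeGroup w t₂
        | none => none := by
  induction t₁ with
  | nil => intro v t₂; simp [mergeGroup]
  | cons num rest ih =>
    intro v t₂
    by_cases h : v = 0
    · simp [mergeGroup, h]
    · cases hp : PySem.Int.ofChars? (PySem.Int.toChars v ++ PySem.Int.toChars num) with
      | none => simp [mergeGroup, h, hp]
      | some w => simp [mergeGroup, h, hp, ih]

lemma mergeWhole_snoc (cur : List Int) (num : Int) (v : Int) (hne : cur ≠ [])
    (hv : mergeWhole cur.reverse = some v) :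
    mergeWhole ((num :: cur).reverse) = mergeGroup v [num] := by
  cases hc : cur.reverse with
  | nil => exact absurd (by simpa using congrArg List.reverse hc) hne
  | cons h t =>
    rw [hc] at hv
    have h2 : (num :: cur).reverse = h :: (t ++ [num]) := by simp [hc]
    rw [h2]
    simp only [mergeWhole] at hv ⊢
    rw [mergeGroup_append, hv]

lemma mergeWhole_snoc_none (cur : List Int) (num : Int) (hne : cur ≠ [])
    (hv : mergeWhole cur.reverse = none) :
    mergeWhole ((num :: cur).reverse) = none := by
  cases hc : cur.reverse with
  | nil => exact absurd (by simpa using congrArg List.reverse hc) hne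
  | cons h t =>
    rw [hc] at hv
    have h2 : (num :: cur).reverse = h :: (t ++ [num]) := by simp [hc]
    rw [h2]
    simp only [mergeWhole] at hv ⊢
    rw [mergeGroup_append, hv]

lemma FB_none (pairs : List (Int × String)) :
    ∀ cur, cur ≠ [] → mergeWhole cur.reverse = none → FB pairs cur = none := by
  induction pairs with
  | nil =>
    intro cur _ hv
    simp [FB, grp, List.mapM_cons, hv]
  | cons p rest ih =>
    intro cur hne hv
    obtain ⟨num, operator⟩ := p
    by_cases h : operator = ""
    · have hv' : mergeWhole ((num :: cur).reverse) = none :=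
        mergeWhole_snoc_none cur num hne hv
      have hfb : FB ((num, operator) :: rest) cur = FB rest (num :: cur) := by
        simp [FB, grp, h]
      rw [hfb]
      exact ih (num :: cur) (by simp) hv'
    · simp [FB, grp, h, List.mapM_cons, hv]

lemma FB_eq_contB (pairs : List (Int × String)) :
    ∀ cur (v : Int), cur ≠ [] → mergeWhole cur.reverse = some v →
      FB pairs cur = contB pairs v := by
  induction pairs with
  | nil =>
    intro cur v _ hv
    simp [FB, grp, contB, List.mapM_cons, hv]
  | cons p rest ih =>
    intro cur v hne hv
    obtain ⟨num, operator⟩ := p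
    have hstep : mergeWhole ((num :: cur).reverse) = mergeGroup v [num] :=
      mergeWhole_snoc cur num v hne hv
    by_cases h : operator = ""
    · have hfb : FB ((num, operator) :: rest) cur = FB rest (num :: cur) := by
        simp [FB, grp, h]
      rw [hfb]
      by_cases hz : v = 0
      · have hv' : mergeWhole ((num :: cur).reverse) = none := by
          rw [hstep]; simp [mergeGroup, hz]
        rw [FB_none rest (num :: cur) (by simp) hv']
        simp [contB, h, hz]
      · cases hp : PySem.Int.ofChars? (PySem.Int.toChars v ++ PySem.Int.toChars num) with
        | some w =>
          have hv' : mergeWhole ((num :: cur).reverse) = some w := by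
            rw [hstep]; simp [mergeGroup, hz, hp]
          rw [ih (num :: cur) w (by simp) hv']
          simp [contB, h, hz, hp]
        | none =>
          have hv' : mergeWhole ((num :: cur).reverse) = none := by
            rw [hstep]; simp [mergeGroup, hz, hp]
          rw [FB_none rest (num :: cur) (by simp) hv']
          simp [contB, h, hz, hp]
    · have hone : mergeWhole ([num].reverse) = some num := by simp [mergeWhole, mergeGroup]
      have hihn := ih [num] num (by simp) hone
      cases hrec : ((grp rest [num]).1).mapM mergeWhole with
      | none =>
        have hL : FB ((num, operator) :: rest) cur = none := by
          simp [FB, grp, h, List.mapM_cons, hv, hrec]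
        have hcr : contB rest num = none := by
          rw [← hihn]; simp [FB, hrec]
        have hR : contB ((num, operator) :: rest) v = none := by
          simp [contB, h, hcr]
        rw [hL, hR]
      | some ns =>
        have hL : FB ((num, operator) :: rest) cur
            = some (v :: ns, operator :: (grp rest [num]).2) := by
          simp [FB, grp, h, List.mapM_cons, hv, hrec]
        have hcr : contB rest num = some (ns, (grp rest [num]).2) := by
          rw [← hihn]; simp [FB, hrec]
        have hR : contB ((num, operator) :: rest) v
            = some (v :: ns, operator :: (grp rest [num]).2) := by
          simp [contB, h, hcr]
        rw [hL, hR]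

lemma pairLoop_eq_contB (pairs : List (Int × String)) :
    ∀ (v : Int) prevRev opsRev,
      pairLoop pairs (v :: prevRev) opsRev
        = (match contB pairs v with
           | some (ns, os) => (some (prevRev.reverse ++ ns), some (opsRev.reverse ++ os))
           | none => (none, none)) := by
  induction pairs with
  | nil => intro v prevRev opsRev; simp [pairLoop, contB]
  | cons p rest ih =>
    intro v prevRev opsRev
    obtain ⟨num, operator⟩ := p
    by_cases h : operator = ""
    · by_cases hz : v = 0
      · simp [pairLoop, contB, h, hz]
      · cases hp : PySem.Int.ofChars? (PySem.Int.toChars v ++ PySem.Int.toChars num) with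
        | some w => simp [pairLoop, contB, h, hz, hp, ih]
        | none => simp [pairLoop, contB, h, hz, hp]
    · rw [pairLoop, if_neg h, ih num (v :: prevRev) (operator :: opsRev)]
      simp only [contB, if_neg h]
      cases hrec : contB rest num with
      | none => simp
      | some p' => obtain ⟨ns, os⟩ := p'; simp

-- A's index loop equals the pair-driven loop once the indices are in range.
lemma mergeLoopA_eq_pairLoop (digits : List Int) (operators : List String)
    (hlen : digits.length ≤ operators.length + 1) :
    ∀ (m k : Nat), digits.length - k = m → 1 ≤ k →
      ∀ rnums rops,
        mergeLoopA digits operators (PySem.List.pyRange (k : Int) (digits.length : Int)) rnums rops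
          = pairLoop ((digits.drop k).zip (operators.drop (k - 1))) rnums rops := by
  intro m
  induction m with
  | zero =>
    intro k hm _ rnums rops
    have hk : digits.length ≤ k := by omega
    have hr : PySem.List.pyRange (k : Int) (digits.length : Int) = [] := by
      simp [PySem.List.pyRange]; omega
    have hd : digits.drop k = [] := List.drop_eq_nil_of_le hk
    simp [hr, hd, mergeLoopA, pairLoop]
  | succ m ih =>
    intro k hm hk rnums rops
    have hklt : k < digits.length := by omega
    have hops : k - 1 < operators.length := by omega
    have hr : PySem.List.pyRange (k : Int) (digits.length : Int)
        = (k : Int) :: PySem.List.pyRange ((k : Int) + 1) (digits.length : Int) :=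
      PySem.List.pyRange_one_cons (by exact_mod_cast hklt)
    have hop : PySem.List.pyGet? operators ((k : Int) - 1)
        = some (operators[k - 1]'hops) := by
      have : (k : Int) - 1 = ((k - 1 : Nat) : Int) := by omega
      rw [this, PySem.List.pyGet?_natCast]
      exact List.getElem?_eq_getElem hops
    have hdig : PySem.List.pyGet? digits (k : Int) = some (digits[k]'hklt) := by
      rw [PySem.List.pyGet?_natCast]
      exact List.getElem?_eq_getElem hklt
    have hdrop : digits.drop k = digits[k]'hklt :: digits.drop (k + 1) :=
      List.drop_eq_getElem_cons hklt
    have hdropo : operators.drop (k - 1) = operators[k - 1]'hops :: operators.drop k := by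
      have hk1 : k - 1 + 1 = k := by omega
      rw [List.drop_eq_getElem_cons hops, hk1]
    have hcast : ((k : Int) + 1) = ((k + 1 : Nat) : Int) := by push_cast; ring
    have ihk' : ∀ rnums rops,
        mergeLoopA digits operators (PySem.List.pyRange ((k : Int) + 1) (digits.length : Int)) rnums rops
          = pairLoop ((digits.drop (k + 1)).zip (operators.drop k)) rnums rops := by
      intro rnums rops
      rw [hcast, ih (k + 1) (by omega) (by omega)]
      simp
    rw [hr, hdrop, hdropo]
    rw [mergeLoopA, hop, hdig]
    simp only [List.zip_cons_cons, pairLoop]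
    by_cases h : operators[k - 1]'hops = ""
    · cases rnums with
      | nil => simp [h]
      | cons last prev =>
        by_cases hz : last = 0
        · simp [h, hz]
        · cases hp : PySem.Int.ofChars? (PySem.Int.toChars last ++ PySem.Int.toChars (digits[k]'hklt)) with
          | none => simp [h, hz, hp]
          | some v => simp [h, hz, hp, ihk']
    · simp [h, ihk']

-- ===== VERDICT (by name: the statement is the Claim_ definition above) =====
theorem merge_digits_spec : Claim_equal_merge_digits := by
  intro digits operators _ hpre
  obtain ⟨hne, hlen, _⟩ := hpre
  unfold Spec_merge_digits
  cases digits with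
  | nil => exact absurd rfl hne
  | cons d0 tl =>
    have hget : PySem.List.pyGet? (d0 :: tl) 0 = some d0 :=
      PySem.List.pyGet?_natCast (d0 :: tl) 0
    have hlenint : PySem.List.len (d0 :: tl) = ((d0 :: tl).length : Int) := by
      simp [PySem.List.len_eq]
    have h1 := mergeLoopA_eq_pairLoop (d0 :: tl) operators hlen
      ((d0 :: tl).length - 1) 1 rfl (by omega) [d0] []
    norm_num at h1
    rw [merge_digits, hget, hlenint]
    show mergeLoopA (d0 :: tl) operators
        (PySem.List.pyRange 1 (((d0 :: tl).length : Nat) : Int)) [d0] [] = _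
    simp only [List.length_cons]
    push_cast
    rw [h1]
    rw [pairLoop_eq_contB (tl.zip operators) d0 [] []]
    have hwh : mergeWhole ([d0].reverse) = some d0 := by simp [mergeWhole, mergeGroup]
    have h2 := FB_eq_contB (tl.zip operators) [d0] d0 (by simp) hwh
    rw [merge_digits_alt, cutGroups_eq_grp]
    simp only [List.reverse_nil, List.nil_append]
    rw [mergeAll_eq_mapM]
    unfold FB at h2
    cases hrec : ((grp (tl.zip operators) [d0]).1).mapM mergeWhole with
    | none =>
      rw [hrec] at h2
      simp [← h2]
    | some ns =>
      rw [hrec] at h2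
      simp [← h2]
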